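-- pv_equiv track=rewrite | github.com/SergeyAPetrov/AdventOfCode2020 | day10/day10.py | count_monotonous_intervals
-- ===== SOURCE A (Python) =====
-- def count_monotonous_intervals(jolts):
--     interval_sizes = []
--     current_interval_length, previous_element = 1, jolts[0]
--     for i, element in enumerate(jolts[1:]):
--         if element - previous_element == 1:
--             current_interval_length += 1
--         else:
--             interval_sizes.append(current_interval_length)
--             current_interval_length = 1
--         previous_element = element
--     interval_sizes.append(current_interval_length)
--     return interval_sizes
-- ===== SOURCE B (Python) =====
-- def count_monotonous_intervals(jolts):
--     if not jolts:
--         return []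
--     breaks = [i for i in range(1, len(jolts)) if jolts[i] - jolts[i - 1] != 1]
--     bounds = [0] + breaks + [len(jolts)]
--     return [b - a for a, b in zip(bounds, bounds[1:])]
-- ===== Notes on version B (the rewrite author's own statement) =====
-- stated objective: alternative
-- what changed: B first collects the break indices where the step is not +1 and returns the differences of consecutive run boundaries, instead of A's single accumulator-and-reset counting loop.
import Mathlib
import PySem

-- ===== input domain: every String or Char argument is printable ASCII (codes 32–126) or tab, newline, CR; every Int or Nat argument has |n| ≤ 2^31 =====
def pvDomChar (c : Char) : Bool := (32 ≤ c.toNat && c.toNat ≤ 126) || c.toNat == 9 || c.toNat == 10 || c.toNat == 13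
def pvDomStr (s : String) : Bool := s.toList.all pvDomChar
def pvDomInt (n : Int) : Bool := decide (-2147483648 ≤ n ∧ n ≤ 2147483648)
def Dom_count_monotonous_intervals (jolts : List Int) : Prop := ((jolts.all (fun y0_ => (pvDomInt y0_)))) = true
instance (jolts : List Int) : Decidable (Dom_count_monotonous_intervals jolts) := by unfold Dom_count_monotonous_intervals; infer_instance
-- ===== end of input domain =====

-- B replaces A's accumulator-and-reset counting loop by collecting break indices and
-- differencing consecutive run boundaries (alternative decomposition, same O(n) cost).
-- On the empty list A raises IndexError (excluded by Pre_); note B itself returns [] there.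

-- ===== PORT A =====
-- step of A's for-loop: state = (interval_sizes, current_interval_length, previous_element)
def pvStepA (st : List Int × Int × Int) (element : Int) : List Int × Int × Int :=
  if element - st.2.2 = 1 then (st.1, st.2.1 + 1, element)
  else (st.1 ++ [st.2.1], 1, element)

def count_monotonous_intervals (jolts : List Int) : List Int :=
  match jolts with
  | [] => []   -- jolts[0] raises IndexError in Python; excluded by Pre_
  | j0 :: rest =>
    let st := rest.foldl pvStepA ([], 1, j0)
    st.1 ++ [st.2.1]

-- ===== PORT B =====
def count_monotonous_intervals_alt (jolts : List Int) : List Int :=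
  if jolts.isEmpty then []
  else
    -- indices i in range(1, len(jolts)) are nonnegative and in range, so Nat indexing is exact
    let breaks := (List.range' 1 (jolts.length - 1)).filter
      (fun i => jolts.getD i 0 - jolts.getD (i - 1) 0 ≠ 1)
    let bounds := 0 :: (breaks ++ [jolts.length])
    (bounds.zip bounds.tail).map (fun p => (p.2 : Int) - (p.1 : Int))

-- ===== PRECONDITION & SPEC =====
-- Pre_ excludes only the empty list, on which A raises IndexError (jolts[0]).
def Pre_count_monotonous_intervals (jolts : List Int) : Prop := jolts ≠ []
instance (jolts : List Int) : Decidable (Pre_count_monotonous_intervals jolts) := by unfold Pre_count_monotonous_intervals; infer_instance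
def pvWitness_count_monotonous_intervals : List Int := [1, 2, 4]

def Spec_count_monotonous_intervals (jolts : List Int) (out : List Int) : Prop := out = count_monotonous_intervals_alt jolts
instance (jolts : List Int) (out : List Int) : Decidable (Spec_count_monotonous_intervals jolts out) := by unfold Spec_count_monotonous_intervals; infer_instance

-- ===== CLAIM (what is proved, stated in full; the proofs are below) =====
def Claim_equal_count_monotonous_intervals : Prop := ∀ (jolts : List Int), Dom_count_monotonous_intervals jolts → Pre_count_monotonous_intervals jolts → Spec_count_monotonous_intervals jolts (count_monotonous_intervals jolts)

-- ===== LEMMAS AND PROOFS =====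

-- run lengths of prev::xs, as (first run length, remaining run lengths)
def pvF (prev : Int) : List Int → Int × List Int
  | [] => (1, [])
  | x :: xs =>
    let r := pvF x xs
    if x - prev = 1 then (r.1 + 1, r.2) else (1, r.1 :: r.2)

-- A's fold, characterized by pvF
theorem pvFoldA_eq (xs : List Int) : ∀ (iv : List Int) (cur prev : Int),
    (let st := xs.foldl pvStepA (iv, cur, prev); st.1 ++ [st.2.1])
      = iv ++ (cur - 1 + (pvF prev xs).1) :: (pvF prev xs).2 := by
  induction xs with
  | nil =>
    intro iv cur prev
    simp only [List.foldl_nil, pvF]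
    norm_num
  | cons x xs ih =>
    intro iv cur prev
    simp only [List.foldl_cons, pvStepA, pvF]
    by_cases h : x - prev = 1
    · simp only [if_pos h, ih]
      have he : cur + 1 - 1 + (pvF x xs).1 = cur - 1 + ((pvF x xs).1 + 1) := by ring
      rw [he]
    · simp only [if_neg h, ih]
      have he : cur - 1 + 1 = cur := by ring
      have h0 : (1 : Int) - 1 + (pvF x xs).1 = (pvF x xs).1 := by ring
      rw [he, h0, List.append_assoc]
      rfl

-- boundary differencing, recursively
def pvDf (a : Nat) : List Nat → Nat → List Int
  | [], n => [(n : Int) - (a : Int)]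
  | b :: bs, n => ((b : Int) - (a : Int)) :: pvDf b bs n

theorem pvZip_eq_df (bs : List Nat) : ∀ (a n : Nat),
    (((a :: (bs ++ [n])).zip (bs ++ [n])).map (fun p => ((p.2 : Nat) : Int) - ((p.1 : Nat) : Int)))
      = pvDf a bs n := by
  induction bs with
  | nil => intro a n; simp [pvDf]
  | cons b bs ih =>
    intro a n
    simp only [List.cons_append, List.zip_cons_cons, List.map_cons, pvDf]
    rw [← ih]

theorem pvDf_shift (bs : List Nat) : ∀ (a n : Nat),
    pvDf (a + 1) (bs.map (· + 1)) (n + 1) = pvDf a bs n := by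
  induction bs with
  | nil => intro a n; simp only [List.map_nil, pvDf]; congr 1; omega
  | cons b bs ih =>
    intro a n
    simp only [List.map_cons, pvDf, ih]
    congr 1
    omega

theorem pvDf_map_succ (bs : List Nat) (n : Nat) :
    pvDf 0 (bs.map (· + 1)) (n + 1) = ((pvDf 0 bs n).headD 0 + 1) :: (pvDf 0 bs n).tail := by
  cases bs with
  | nil => simp only [List.map_nil, pvDf, List.headD_cons, List.tail_cons]; norm_num
  | cons b bs =>
    simp only [List.map_cons, pvDf, List.headD_cons, List.tail_cons, pvDf_shift bs b n]
    norm_num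

def pvBreaks (jolts : List Int) : List Nat :=
  (List.range' 1 (jolts.length - 1)).filter
    (fun i => jolts.getD i 0 - jolts.getD (i - 1) 0 ≠ 1)

theorem pvBreaks_cons (j0 x : Int) (xs : List Int) :
    pvBreaks (j0 :: x :: xs)
      = (if x - j0 ≠ 1 then [1] else []) ++ (pvBreaks (x :: xs)).map (· + 1) := by
  unfold pvBreaks
  have h1 : (j0 :: x :: xs).length - 1 = ((x :: xs).length - 1) + 1 := by simp
  rw [h1]
  have h2 : List.range' 1 (((x :: xs).length - 1) + 1)
      = 1 :: (List.range' 1 ((x :: xs).length - 1)).map (· + 1) := by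
    rw [List.range'_succ, List.range'_succ_left]
  rw [h2, List.filter_cons, List.filter_map]
  have h3 : ∀ i ∈ List.range' 1 ((x :: xs).length - 1),
      ((fun i => decide ¬((j0 :: x :: xs).getD i 0 - (j0 :: x :: xs).getD (i - 1) 0 = 1)) ∘ (· + 1)) i
        = (fun i => decide ¬((x :: xs).getD i 0 - (x :: xs).getD (i - 1) 0 = 1)) i := by
    intro i hi
    rw [List.mem_range'] at hi
    obtain ⟨k, _, rfl⟩ := hi
    simp only [Function.comp_apply, Nat.one_mul]
    rw [show 1 + k + 1 - 1 = k + 1 from by omega, show 1 + k + 1 = (k + 1) + 1 from by omega,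
      show 1 + k = k + 1 from by omega, show k + 1 - 1 = k from by omega]
    simp [List.getD]
  rw [List.filter_congr h3]
  by_cases hx : x - j0 = 1
  · simp [List.getD, hx]
  · simp [List.getD, hx]

theorem pvB_core (xs : List Int) : ∀ (j0 : Int),
    pvDf 0 (pvBreaks (j0 :: xs)) (j0 :: xs).length
      = (pvF j0 xs).1 :: (pvF j0 xs).2 := by
  induction xs with
  | nil =>
    intro j0
    simp [pvBreaks, pvDf, pvF]
  | cons x xs ih =>
    intro j0
    rw [pvBreaks_cons]
    have hlen : (j0 :: x :: xs).length = (x :: xs).length + 1 := by simp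
    rw [hlen]
    by_cases hx : x - j0 = 1
    · simp only [hx, ne_eq, not_true_eq_false, if_false, List.nil_append]
      rw [pvDf_map_succ, ih]
      simp [pvF, hx]
    · simp only [hx, ne_eq, not_false_eq_true, if_true, List.singleton_append]
      simp only [pvDf]
      have hsh : pvDf 1 ((pvBreaks (x :: xs)).map (· + 1)) ((x :: xs).length + 1)
          = pvDf 0 (pvBreaks (x :: xs)) (x :: xs).length := by
        have h := pvDf_shift (pvBreaks (x :: xs)) 0 (x :: xs).length
        simpa using h
      rw [hsh, ih]
      simp only [pvF, hx]
      congr 1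

-- ===== VERDICT (by name: the statement is the Claim_ definition above) =====
theorem count_monotonous_intervals_spec : Claim_equal_count_monotonous_intervals := by
  intro jolts _ hpre
  unfold Spec_count_monotonous_intervals
  match jolts with
  | [] => exact absurd rfl hpre
  | j0 :: rest =>
    show count_monotonous_intervals (j0 :: rest) = count_monotonous_intervals_alt (j0 :: rest)
    unfold count_monotonous_intervals count_monotonous_intervals_alt
    simp only [List.isEmpty_cons, Bool.false_eq_true, if_false]
    rw [pvFoldA_eq]
    have h := (pvZip_eq_df (pvBreaks (j0 :: rest)) 0 (j0 :: rest).length).trans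
      (pvB_core rest j0)
    simp only [List.nil_append]
    rw [show (1 : Int) - 1 + (pvF j0 rest).1 = (pvF j0 rest).1 by ring]
    exact h.symm
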